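-- pv_equiv track=rewrite | github.com/zhangbobo131415/leetcode_zhang | sougou.py | jisuan_v
-- ===== SOURCE A (Python) =====
-- def jisuan_v(tem_data, cishu):
--     if len(tem_data) == 1:
--         return tem_data[0]
--     for i in range(len(tem_data) // 2):
--         p, q = tem_data[0], tem_data[1]
--         tem_data.pop(0)
--         tem_data.pop(0)
--         if cishu & 1 == 1:
--             tem_data.append(p | q)
--         else:
--             tem_data.append(p ^ q)
--     return jisuan_v(tem_data,cishu+1)
-- ===== SOURCE B (Python) =====
-- def _pairs(data, cishu):
--     # combine adjacent pairs, left to right; a trailing odd element is ignored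
--     out = []
--     i = 0
--     while i + 1 < len(data):
--         p, q = data[i], data[i + 1]
--         out.append(p | q if cishu & 1 == 1 else p ^ q)
--         i += 2
--     return out
--
--
-- def jisuan_v(tem_data, cishu):
--     # Note: unlike the original, this does not mutate tem_data in place.
--     data = list(tem_data)
--     while len(data) > 1:
--         data = ([data[-1]] if len(data) % 2 == 1 else []) + _pairs(data, cishu)
--         cishu += 1
--     return data[0]
-- ===== Notes on version B (the rewrite author's own statement) =====
-- stated objective: faster
-- what changed: Replaces A's recursion over rounds of in-place pop(0)/pop(0)/append mutations with a non-mutating while loop that rebuilds each round as (odd leftover) + pairs collected by a single index loop, removing the linear-time pop(0) shifts.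
import Mathlib
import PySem

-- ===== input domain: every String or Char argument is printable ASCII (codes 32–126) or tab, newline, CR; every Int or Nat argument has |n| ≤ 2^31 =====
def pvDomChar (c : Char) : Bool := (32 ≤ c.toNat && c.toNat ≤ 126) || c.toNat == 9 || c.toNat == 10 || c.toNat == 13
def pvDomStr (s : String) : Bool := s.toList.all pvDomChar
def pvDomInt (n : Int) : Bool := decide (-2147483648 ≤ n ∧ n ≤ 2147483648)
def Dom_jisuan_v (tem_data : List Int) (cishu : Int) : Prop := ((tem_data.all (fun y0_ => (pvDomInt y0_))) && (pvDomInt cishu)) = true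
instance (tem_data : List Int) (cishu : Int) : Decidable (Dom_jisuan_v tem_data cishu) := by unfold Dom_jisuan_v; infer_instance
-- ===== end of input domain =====

-- B replaces A's recursion over rounds of in-place pop(0)/append mutations by a while loop
-- that rebuilds each round from the odd leftover plus an index loop combining adjacent pairs
-- (measured faster; return value only — A mutates its argument in place, B does not).


-- ===== PORT A =====
-- the `if cishu & 1 == 1: p | q else: p ^ q` choice of combined value (shared by both ports)
def opAB (c p q : Int) : Int :=
  if PySem.Int.band c 1 = 1 then PySem.Int.bor p q else PySem.Int.bxor p q

-- one iteration of A's for-loop: pop the two front elements, append the combined value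
def stepA (c : Int) (l : List Int) : List Int :=
  match l with
  | p :: q :: rest => rest ++ [opAB c p q]
  | l => l

-- `for i in range(len(tem_data) // 2)`: apply stepA that many times
def roundA : Nat → Int → List Int → List Int
  | 0, _, l => l
  | k + 1, c, l => roundA k c (stepA c l)

-- A's tail recursion over rounds; `fuel` is only a structural totality guard (each round
-- shortens a list of length ≥ 2, so fuel = len + 1 at the call site is always enough;
-- only the empty list, on which the Python recurses forever, would exhaust it)
def jisuanGo : Nat → List Int → Int → Int
  | fuel + 1, l, c =>
    if l.length = 1 then PySem.List.pyGetD l 0 0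
    else jisuanGo fuel (roundA (l.length / 2) c l) (c + 1)
  | 0, _, _ => 0

def jisuan_v (tem_data : List Int) (cishu : Int) : Int :=
  jisuanGo (tem_data.length + 1) tem_data cishu

-- ===== PORT B =====
-- Source B's `_pairs`: index loop `while i + 1 < len(data)` appending the combined pair to
-- `out`; `fuel` is only a structural bound on the remaining iterations (the loop advances
-- i by 2 each pass, so fuel = len(data) at the call site is always enough)
def pairsLoop (data : List Int) (c : Int) : Nat → Nat → List Int → List Int
  | fuel + 1, i, out =>
    if i + 1 < data.length then
      pairsLoop data c fuel (i + 2)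
        (out ++ [opAB c (PySem.List.pyGetD data i 0) (PySem.List.pyGetD data (i + 1) 0)])
    else out
  | 0, _, out => out

-- Source B's `while len(data) > 1` loop; `fuel` is only a structural totality guard (each pass
-- shortens a list of length ≥ 2, so fuel = len(data) at the call site is always enough)
def bGo : Nat → List Int → Int → Int
  | fuel + 1, data, c =>
    if 1 < data.length then
      bGo fuel ((if data.length % 2 = 1 then [PySem.List.pyGetD data (-1) 0] else [])
                 ++ pairsLoop data c data.length 0 []) (c + 1)
    else PySem.List.pyGetD data 0 0
  | 0, data, _ => PySem.List.pyGetD data 0 0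

def jisuan_v_alt (tem_data : List Int) (cishu : Int) : Int :=
  bGo tem_data.length tem_data cishu   -- data = list(tem_data): a copy, same elements

-- ===== PRECONDITION & SPEC =====
-- Pre_ excludes only the empty list, on which the Python A recurses forever (RecursionError).
def Pre_jisuan_v (tem_data : List Int) (cishu : Int) : Prop := tem_data ≠ []
instance (tem_data : List Int) (cishu : Int) : Decidable (Pre_jisuan_v tem_data cishu) := by
  unfold Pre_jisuan_v; infer_instance
def pvWitness_jisuan_v : List Int × Int := ([3, 5, 7, 9], 0)

def Spec_jisuan_v (tem_data : List Int) (cishu : Int) (out : Int) : Prop := out = jisuan_v_alt tem_data cishu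
instance (tem_data : List Int) (cishu : Int) (out : Int) : Decidable (Spec_jisuan_v tem_data cishu out) := by unfold Spec_jisuan_v; infer_instance

-- ===== CLAIM (what is proved, stated in full; the proofs are below) =====
def Claim_equal_jisuan_v : Prop := ∀ (tem_data : List Int) (cishu : Int), Dom_jisuan_v tem_data cishu → Pre_jisuan_v tem_data cishu → Spec_jisuan_v tem_data cishu (jisuan_v tem_data cishu)

-- ===== LEMMAS AND PROOFS =====

theorem roundA_length (k : Nat) (c : Int) : ∀ (l : List Int), 2 * k ≤ l.length →
    (roundA k c l).length = l.length - k := by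
  induction k with
  | zero => intro l _; simp [roundA]
  | succ k ih =>
    intro l hl
    match l with
    | p :: q :: rest =>
      have := ih (rest ++ [opAB c p q]) (by simp only [List.length_append, List.length_cons, List.length_nil] at hl ⊢; omega)
      simp [roundA, stepA, this]
    | [] => simp at hl
    | [a] => simp at hl; omega

-- structural view of one round's pairs: combine adjacent pairs left to right
def pairsB : List Int → Int → List Int
  | p :: q :: rest, c => opAB c p q :: pairsB rest c
  | _, _ => []

theorem pairsB_short (l : List Int) (c : Int) (h : l.length ≤ 1) : pairsB l c = [] := by
  match l with
  | [] => simp [pairsB]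
  | [a] => simp [pairsB]
  | p :: q :: rest => simp at h

-- the index loop computes pairsB of the unprocessed suffix
theorem pairsLoop_eq (data : List Int) (c : Int) : ∀ (fuel i : Nat) (out : List Int),
    data.length ≤ fuel + i → pairsLoop data c fuel i out = out ++ pairsB (data.drop i) c
  | fuel + 1, i, out, hf => by
    rw [pairsLoop]
    split
    · next h =>
      rw [pairsLoop_eq data c fuel (i + 2) _ (by omega)]
      have h1 : i < data.length := by omega
      have h2 : i + 1 < data.length := h
      have d1 : data.drop i = data[i] :: data.drop (i + 1) := List.drop_eq_getElem_cons h1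
      have d2 : data.drop (i + 1) = data[i + 1] :: data.drop (i + 2) := List.drop_eq_getElem_cons h2
      have g1 : PySem.List.pyGetD data (i : Int) 0 = data[i] := by
        rw [PySem.List.pyGetD_natCast]; exact List.getD_eq_getElem _ _ h1
      have g2 : PySem.List.pyGetD data ((i : Int) + 1) 0 = data[i + 1] := by
        have hc : ((i : Int) + 1) = ((i + 1 : Nat) : Int) := by push_cast; ring
        rw [hc, PySem.List.pyGetD_natCast]; exact List.getD_eq_getElem _ _ h2
      rw [d1, d2]
      simp [pairsB, g1, g2]
    · next h =>
      rw [pairsB_short _ _ (by simp; omega)]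
      simp
  | 0, i, out, hf => by
    rw [pairsLoop, pairsB_short _ _ (by simp; omega)]
    simp

-- A's loop over one round: the unconsumed tail, then the combined pairs in order
theorem roundA_eq (c : Int) : ∀ (k : Nat) (l : List Int), 2 * k ≤ l.length →
    roundA k c l = l.drop (2 * k) ++ pairsB (l.take (2 * k)) c := by
  intro k
  induction k with
  | zero => intro l _; simp [roundA, pairsB]
  | succ k ih =>
    intro l hl
    match l with
    | p :: q :: rest =>
      simp at hl
      have h2k : 2 * k ≤ rest.length := by omega
      have hdrop : (rest ++ [opAB c p q]).drop (2 * k) = rest.drop (2 * k) ++ [opAB c p q] :=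
        List.drop_append_of_le_length h2k
      have htake : (rest ++ [opAB c p q]).take (2 * k) = rest.take (2 * k) :=
        List.take_append_of_le_length h2k
      have := ih (rest ++ [opAB c p q]) (by simp; omega)
      simp [roundA, stepA, this, hdrop, htake]
      have : 2 * (k + 1) = 2 * k + 1 + 1 := by omega
      simp [this, pairsB]
    | [] => simp at hl
    | [a] => simp at hl; omega

-- pairsB ignores a trailing odd element
theorem pairsB_take : ∀ (l : List Int) (c : Int),
    pairsB (l.take (2 * (l.length / 2))) c = pairsB l c
  | [], _ => by simp
  | [_], _ => by simp [pairsB]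
  | p :: q :: rest, c => by
    have h : 2 * ((p :: q :: rest).length / 2) = 2 * (rest.length / 2) + 1 + 1 := by
      simp; omega
    rw [h]
    simp [pairsB, pairsB_take rest c]

-- the unconsumed tail of a full round: the last element iff the length is odd
theorem drop_round (l : List Int) (h : l ≠ []) :
    l.drop (2 * (l.length / 2)) =
      if l.length % 2 = 1 then [PySem.List.pyGetD l (-1) 0] else [] := by
  rcases Nat.even_or_odd l.length with he | ho
  · have hm := Nat.even_iff.mp he
    have h0 : 2 * (l.length / 2) = l.length := by omega
    simp [h0, hm]
  · have hm := Nat.odd_iff.mp ho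
    have hlt : l.length - 1 < l.length := by
      have := List.length_pos_iff.mpr h; omega
    have h1 : 2 * (l.length / 2) = l.length - 1 := by omega
    have h2 : l.drop (l.length - 1) = l[l.length - 1] :: l.drop (l.length - 1 + 1) :=
      List.drop_eq_getElem_cons hlt
    have h3 : l.drop (l.length - 1 + 1) = [] := by
      apply List.drop_eq_nil_of_le; omega
    rw [h1, h2, h3, PySem.List.pyGetD_neg_ofNat l 1 0 (by omega)
        (by have := List.length_pos_iff.mpr h; omega)]
    simp [hm]

theorem agree : ∀ (fuel : Nat) (l : List Int) (c : Int) (g : Nat), l ≠ [] →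
    l.length ≤ fuel → l.length ≤ g → jisuanGo fuel l c = bGo g l c := by
  intro fuel
  induction fuel with
  | zero =>
    intro l c g hne hf _
    have := List.length_pos_iff.mpr hne
    omega
  | succ f ih =>
    intro l c g hne hf hg
    have hpos := List.length_pos_iff.mpr hne
    obtain ⟨g', rfl⟩ : ∃ g', g = g' + 1 := ⟨g - 1, by omega⟩
    rw [jisuanGo, bGo]
    by_cases h1 : l.length = 1
    · simp [h1]
    · have hge : 2 ≤ l.length := by omega
      rw [if_neg h1, if_pos (by omega)]
      have hnext : roundA (l.length / 2) c l =
          (if l.length % 2 = 1 then [PySem.List.pyGetD l (-1) 0] else [])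
            ++ pairsLoop l c l.length 0 [] := by
        rw [roundA_eq c (l.length / 2) l (by omega), pairsB_take, drop_round l hne,
            pairsLoop_eq l c l.length 0 [] (by omega)]
        simp
      have hlen : (roundA (l.length / 2) c l).length = l.length - l.length / 2 :=
        roundA_length _ _ _ (by omega)
      have hnnil : roundA (l.length / 2) c l ≠ [] := by
        intro hc; rw [hc] at hlen; simp at hlen; omega
      rw [← hnext]
      exact ih (roundA (l.length / 2) c l) (c + 1) g' hnnil (by omega) (by omega)

-- ===== VERDICT (by name: the statement is the Claim_ definition above) =====
theorem jisuan_v_spec : Claim_equal_jisuan_v := by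
  intro l c _ hpre
  unfold Spec_jisuan_v jisuan_v_alt jisuan_v
  have := List.length_pos_iff.mpr hpre
  exact agree (l.length + 1) l c l.length hpre (by omega) (by omega)
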